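-- pv_equiv track=rewrite | github.com/JoeFarag-00/Moti-CSIM | main.py | Adjust_Resources
-- ===== SOURCE A (Python) =====
-- def Adjust_Resources(resource_list, food_amount, drink_amount):
--
--     max_food = 15
--     max_drink = 15
--
--     excess_food = max(len([item for item in resource_list if item.startswith('Food')]) - food_amount, 0)
--     excess_drink = max(len([item for item in resource_list if item.startswith('Drink')]) - drink_amount, 0)
--
--     for i in range(len(resource_list) - 1, -1, -1):
--         if resource_list[i].startswith('Food') and excess_food > 0:
--             del resource_list[i]
--             excess_food -= 1
--
--     for i in range(len(resource_list) - 1, -1, -1):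
--         if resource_list[i].startswith('Drink') and excess_drink > 0:
--             del resource_list[i]
--             excess_drink -= 1
--
--     return resource_list
-- ===== SOURCE B (Python) =====
-- # Single forward pass: keep the first (count - excess) items of each category.
-- # Note: A mutates resource_list in place; B returns a fresh list (return value equal).
-- def Adjust_Resources(resource_list, food_amount, drink_amount):
--     n_food = sum(1 for x in resource_list if x.startswith('Food'))
--     n_drink = sum(1 for x in resource_list if x.startswith('Drink'))
--     keep_food = min(n_food, max(food_amount, 0))
--     keep_drink = min(n_drink, max(drink_amount, 0))
--     out = []
--     for x in resource_list:
--         if x.startswith('Food'):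
--             if keep_food > 0:
--                 out.append(x)
--                 keep_food -= 1
--         elif x.startswith('Drink'):
--             if keep_drink > 0:
--                 out.append(x)
--                 keep_drink -= 1
--         else:
--             out.append(x)
--     return out
-- ===== Notes on version B (the rewrite author's own statement) =====
-- stated objective: alternative
-- what changed: Replaces A's two backward in-place deletion loops (count excess, then delete the last excess items of each category with del) by one forward pass that keeps the first (count - excess) items of each category, building a new list; A mutates resource_list in place, B does not (return value is equal).
import Mathlib
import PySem

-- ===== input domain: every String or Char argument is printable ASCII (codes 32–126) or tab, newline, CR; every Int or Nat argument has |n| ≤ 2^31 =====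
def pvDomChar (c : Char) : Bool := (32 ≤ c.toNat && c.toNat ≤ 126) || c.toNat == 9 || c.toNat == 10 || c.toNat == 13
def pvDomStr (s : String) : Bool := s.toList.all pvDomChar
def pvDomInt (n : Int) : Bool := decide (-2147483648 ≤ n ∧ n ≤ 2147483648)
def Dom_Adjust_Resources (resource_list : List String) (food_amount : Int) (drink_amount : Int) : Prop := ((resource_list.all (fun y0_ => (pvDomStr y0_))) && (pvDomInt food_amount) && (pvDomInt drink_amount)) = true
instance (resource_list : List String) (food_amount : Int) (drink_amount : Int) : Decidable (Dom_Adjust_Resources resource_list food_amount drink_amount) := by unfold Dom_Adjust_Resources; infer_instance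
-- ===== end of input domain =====

-- B replaces A's two backward in-place deletion loops by one forward pass keeping the
-- first (count - excess) items of each category; A mutates resource_list in place and
-- returns it, B builds a fresh list — the equivalence proved here is about the RETURN
-- value.

-- ===== PORT A =====
-- the backward loop `for i in range(len-1,-1,-1): if lst[i].startswith(p) and excess>0:
-- del lst[i]; excess -= 1` visits elements right to left (deleting at index i only
-- shifts indices above i, which are not visited again), so it is this right-to-left
-- recursion threading the excess counter.
def pvDelBack (p : String) : List String → Int → List String × Int
  | [], e => ([], e)
  | x :: xs, e =>
    let r := pvDelBack p xs e
    if PySem.Str.startswith x p && decide (0 < r.2) then (r.1, r.2 - 1) else (x :: r.1, r.2)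

def Adjust_Resources (resource_list : List String) (food_amount : Int) (drink_amount : Int) : List String :=
  let excess_food : Int := max (((resource_list.filter (fun item => PySem.Str.startswith item "Food")).length : Int) - food_amount) 0
  let excess_drink : Int := max (((resource_list.filter (fun item => PySem.Str.startswith item "Drink")).length : Int) - drink_amount) 0
  let l1 := (pvDelBack "Food" resource_list excess_food).1
  let l2 := (pvDelBack "Drink" l1 excess_drink).1
  l2

-- ===== PORT B =====
-- single forward pass keeping the first keep_food / keep_drink items of each category
def pvKeepBoth : Int → Int → List String → List String
  | _, _, [] => []
  | kf, kd, x :: xs =>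
    if PySem.Str.startswith x "Food" then
      if 0 < kf then x :: pvKeepBoth (kf - 1) kd xs else pvKeepBoth kf kd xs
    else if PySem.Str.startswith x "Drink" then
      if 0 < kd then x :: pvKeepBoth kf (kd - 1) xs else pvKeepBoth kf kd xs
    else x :: pvKeepBoth kf kd xs

def Adjust_Resources_alt (resource_list : List String) (food_amount : Int) (drink_amount : Int) : List String :=
  let n_food : Int := resource_list.foldl (fun a x => if PySem.Str.startswith x "Food" then a + 1 else a) 0
  let n_drink : Int := resource_list.foldl (fun a x => if PySem.Str.startswith x "Drink" then a + 1 else a) 0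
  let keep_food := min n_food (max food_amount 0)
  let keep_drink := min n_drink (max drink_amount 0)
  pvKeepBoth keep_food keep_drink resource_list

-- ===== PRECONDITION & SPEC =====
def Spec_Adjust_Resources (resource_list : List String) (food_amount : Int) (drink_amount : Int) (out : List String) : Prop := out = Adjust_Resources_alt resource_list food_amount drink_amount
instance (resource_list : List String) (food_amount : Int) (drink_amount : Int) (out : List String) : Decidable (Spec_Adjust_Resources resource_list food_amount drink_amount out) := by unfold Spec_Adjust_Resources; infer_instance

-- ===== CLAIM (what is proved, stated in full; the proofs are below) =====
def Claim_equal_Adjust_Resources : Prop := ∀ (resource_list : List String) (food_amount : Int) (drink_amount : Int), Dom_Adjust_Resources resource_list food_amount drink_amount → Spec_Adjust_Resources resource_list food_amount drink_amount (Adjust_Resources resource_list food_amount drink_amount)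

-- ===== LEMMAS AND PROOFS =====

-- single-category forward keeper (proof vocabulary)
def pvKeepOne (p : String) : Int → List String → List String
  | _, [] => []
  | k, x :: xs =>
    if PySem.Str.startswith x p then
      if 0 < k then x :: pvKeepOne p (k - 1) xs else pvKeepOne p k xs
    else x :: pvKeepOne p k xs

-- B's counting fold equals the filter length A uses
theorem pvFold_count (p : String) (l : List String) (a : Int) :
    l.foldl (fun a x => if PySem.Str.startswith x p then a + 1 else a) a
      = a + ((l.filter (fun x => PySem.Str.startswith x p)).length : Int) := by
  induction l generalizing a with
  | nil => simp
  | cons x xs ih =>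
    simp only [List.foldl_cons, List.filter_cons]
    by_cases h : PySem.Str.startswith x p = true
    · rw [if_pos h, if_pos h, ih, List.length_cons]; push_cast; ring
    · rw [if_neg h, if_neg h, ih]

-- characterisation of A's backward deletion loop (for 0 ≤ e): it keeps the first
-- (c - min e c) matched items (c = matched count) and returns excess e - min e c
theorem pvDelBack_eq (p : String) (l : List String) (e : Int) (he : 0 ≤ e) :
    pvDelBack p l e =
      (pvKeepOne p (((l.filter (fun x => PySem.Str.startswith x p)).length : Int)
          - min e ((l.filter (fun x => PySem.Str.startswith x p)).length : Int)) l,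
       e - min e ((l.filter (fun x => PySem.Str.startswith x p)).length : Int)) := by
  induction l with
  | nil => simp [pvDelBack, pvKeepOne, min_eq_right he]
  | cons x xs ih =>
    simp only [pvDelBack, List.filter_cons]
    rw [ih]
    by_cases h : PySem.Str.startswith x p = true
    · rw [if_pos h, List.length_cons]
      set c : Int := ((xs.filter (fun x => PySem.Str.startswith x p)).length : Int) with hc
      have hc0 : 0 ≤ c := by positivity
      push_cast
      by_cases hgt : (0:Int) < e - min e c
      · have hec : c < e := by omega
        rw [if_pos (by rw [h, Bool.true_and, decide_eq_true_eq]; exact hgt)]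
        have h2 : min e c = c := by omega
        have h1 : min e (c + 1) = c + 1 := by omega
        rw [h1, h2]
        refine Prod.ext ?_ (by omega)
        show pvKeepOne p (c - c) xs = pvKeepOne p (c + 1 - (c + 1)) (x :: xs)
        rw [show c - c = (0:Int) by ring, show c + 1 - (c + 1) = (0:Int) by ring]
        simp only [pvKeepOne, if_pos h, if_neg (show ¬ (0:Int) < 0 by omega)]
      · have hle : e ≤ c := by omega
        have h2 : min e c = e := by omega
        rw [if_neg (by rw [h, Bool.true_and, decide_eq_true_eq]; omega)]
        have h1 : min e (c + 1) = e := by omega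
        rw [h1, h2]
        refine Prod.ext ?_ (by omega)
        show x :: pvKeepOne p (c - e) xs = pvKeepOne p (c + 1 - e) (x :: xs)
        simp only [pvKeepOne, if_pos h, if_pos (show (0:Int) < c + 1 - e by omega)]
        rw [show c + 1 - e - 1 = c - e by ring]
    · simp only [Bool.not_eq_true] at h
      rw [if_neg (by rw [h]; simp), if_neg (by rw [h]; simp)]
      refine Prod.ext ?_ rfl
      show x :: _ = pvKeepOne p _ (x :: xs)
      simp only [pvKeepOne, if_neg (show ¬ PySem.Str.startswith x p = true by rw [h]; simp)]

-- no string starts with both "Food" and "Drink"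
theorem pvNotBoth (x : String) (h : PySem.Str.startswith x "Food" = true) :
    PySem.Str.startswith x "Drink" = false := by
  by_contra hd
  simp only [Bool.not_eq_false] at hd
  rw [PySem.Str.startswith_eq, PySem.Chars.startswith_iff] at h hd
  obtain ⟨t1, h1⟩ := h
  obtain ⟨t2, h2⟩ := hd
  rw [← h1] at h2
  rw [show "Food".toList = ['F','o','o','d'] from by decide,
      show "Drink".toList = ['D','r','i','n','k'] from by decide] at h2
  simp at h2

-- deleting Food items does not change the Drink-filtered sublist
theorem pvFilter_keepOne (k : Int) (l : List String) :
    (pvKeepOne "Food" k l).filter (fun x => PySem.Str.startswith x "Drink")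
      = l.filter (fun x => PySem.Str.startswith x "Drink") := by
  induction l generalizing k with
  | nil => simp [pvKeepOne]
  | cons x xs ih =>
    cases hf : PySem.Str.startswith x "Food" with
    | true =>
      have hd := pvNotBoth x hf
      by_cases hk : (0:Int) < k <;>
        simp [pvKeepOne, hf, hd, hk, ih, -PySem.Str.startswith_eq]
    | false =>
      simp [pvKeepOne, hf, List.filter_cons, ih, -PySem.Str.startswith_eq]

-- composing the two single-category keepers is B's one simultaneous pass
theorem pvKeep_comp (kf kd : Int) (l : List String) :
    pvKeepOne "Drink" kd (pvKeepOne "Food" kf l) = pvKeepBoth kf kd l := by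
  induction l generalizing kf kd with
  | nil => simp [pvKeepOne, pvKeepBoth]
  | cons x xs ih =>
    cases hf : PySem.Str.startswith x "Food" with
    | true =>
      have hd := pvNotBoth x hf
      by_cases hk : (0:Int) < kf <;>
        simp [pvKeepOne, pvKeepBoth, hf, hd, hk, ih, -PySem.Str.startswith_eq]
    | false =>
      cases hdr : PySem.Str.startswith x "Drink" with
      | true =>
        by_cases hk : (0:Int) < kd <;>
          simp [pvKeepOne, pvKeepBoth, hf, hdr, hk, ih, -PySem.Str.startswith_eq]
      | false =>
        simp [pvKeepOne, pvKeepBoth, hf, hdr, ih, -PySem.Str.startswith_eq]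

-- ===== VERDICT (by name: the statement is the Claim_ definition above) =====
theorem Adjust_Resources_spec : Claim_equal_Adjust_Resources := by
  intro l f d _
  unfold Spec_Adjust_Resources Adjust_Resources Adjust_Resources_alt
  dsimp only
  set cf : Int := ((l.filter (fun x => PySem.Str.startswith x "Food")).length : Int) with hcf
  set cd : Int := ((l.filter (fun x => PySem.Str.startswith x "Drink")).length : Int) with hcd
  have hcf0 : 0 ≤ cf := by positivity
  have hcd0 : 0 ≤ cd := by positivity
  rw [pvDelBack_eq _ _ _ (le_max_right (cf - f) 0)]
  rw [pvDelBack_eq _ _ _ (le_max_right (cd - d) 0)]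
  simp only [← hcf, pvFilter_keepOne, ← hcd]
  rw [pvKeep_comp, pvFold_count, pvFold_count, ← hcf, ← hcd]
  congr 1 <;> omega
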